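-- pv_equiv track=rewrite | github.com/elliotG49/ML-DGA-Predictor | scripts/feature-engineering/v0.1/longest_dict_word.py | longest_dictionary_word
-- ===== SOURCE A (Python) =====
-- def longest_dictionary_word(domain: str, dictionary_set: set) -> int:
--     """
--     Find the length of the longest word within 'domain' that appears in 'dictionary_set'.
--     Returns 0 if no dictionary word is found.
--
--     Assumes dictionary_set is a Python set of valid words.
--     """
--     domain_lower = domain.lower()
--     max_length = 0
--
--     # Optional: Remove TLDs or punctuation, if desired. For now, use domain as-is.
--
--     # Check all substrings
--     for start_idx in range(len(domain_lower)):
--         for end_idx in range(start_idx + 1, len(domain_lower) + 1):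
--             substring = domain_lower[start_idx:end_idx]
--             if substring in dictionary_set and len(substring) > max_length:
--                 max_length = len(substring)
--
--     return max_length
-- ===== SOURCE B (Python) =====
-- def longest_dictionary_word(domain: str, dictionary_set: set) -> int:
--     """Iterate the dictionary, not the O(n^2) substrings of the domain:
--     a word contributes iff it occurs in the lowercased domain."""
--     domain_lower = domain.lower()
--     max_length = 0
--     for word in dictionary_set:
--         if word in domain_lower:
--             max_length = max(max_length, len(word))
--     return max_length
-- ===== Notes on version B (the rewrite author's own statement) =====
-- stated objective: faster
-- what changed: Instead of enumerating all O(n^2) substrings of the domain and testing set membership, B scans each dictionary word once and tests substring containment in the lowercased domain, keeping the maximum hit length.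
import Mathlib
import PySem

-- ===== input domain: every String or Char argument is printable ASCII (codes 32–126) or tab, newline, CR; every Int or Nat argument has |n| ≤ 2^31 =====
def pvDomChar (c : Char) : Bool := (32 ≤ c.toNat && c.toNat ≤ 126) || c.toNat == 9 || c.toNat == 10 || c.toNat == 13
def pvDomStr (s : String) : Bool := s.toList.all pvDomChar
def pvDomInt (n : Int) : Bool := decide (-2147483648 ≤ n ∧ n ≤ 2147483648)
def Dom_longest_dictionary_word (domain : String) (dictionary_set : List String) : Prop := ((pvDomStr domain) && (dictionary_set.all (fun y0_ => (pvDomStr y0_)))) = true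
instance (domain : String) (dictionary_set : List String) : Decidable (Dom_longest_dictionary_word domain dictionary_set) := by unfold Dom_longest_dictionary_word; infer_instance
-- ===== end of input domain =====

-- B iterates the dictionary words and tests substring containment instead of
-- enumerating all substrings of the domain; same return value, asymptotically faster.


-- ===== PORT A =====
-- literal port: domain_lower = domain.lower(); for start_idx in range(len); for end_idx
-- in range(start_idx+1, len+1); substring = slice; update max_length on membership + longer
def longest_dictionary_word (domain : String) (dictionary_set : List String) : Int :=
  let domain_lower := PySem.Str.lower domain
  (PySem.List.pyRange 0 (PySem.Str.len domain_lower) 1).foldl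
    (fun max_length start_idx =>
      (PySem.List.pyRange (start_idx + 1) (PySem.Str.len domain_lower + 1) 1).foldl
        (fun max_length end_idx =>
          -- substring = domain_lower[start_idx:end_idx]  (inlined)
          if PySem.Str.slice domain_lower (some start_idx) (some end_idx) ∈ dictionary_set ∧
              PySem.Str.len (PySem.Str.slice domain_lower (some start_idx) (some end_idx)) > max_length then
            PySem.Str.len (PySem.Str.slice domain_lower (some start_idx) (some end_idx))
          else max_length)
        max_length)
    0

-- ===== PORT B =====
-- literal port of Source B: one pass over the dictionary, substring test against domain_lower
def longest_dictionary_word_alt (domain : String) (dictionary_set : List String) : Int :=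
  let domain_lower := PySem.Str.lower domain
  dictionary_set.foldl
    (fun max_length word =>
      if PySem.Str.isIn word domain_lower then
        max max_length (PySem.Str.len word)
      else max_length)
    0

-- ===== PRECONDITION & SPEC =====
def Spec_longest_dictionary_word (domain : String) (dictionary_set : List String) (out : Int) : Prop := out = longest_dictionary_word_alt domain dictionary_set
instance (domain : String) (dictionary_set : List String) (out : Int) : Decidable (Spec_longest_dictionary_word domain dictionary_set out) := by unfold Spec_longest_dictionary_word; infer_instance

-- ===== CLAIM (what is proved, stated in full; the proofs are below) =====
def Claim_equal_longest_dictionary_word : Prop := ∀ (domain : String) (dictionary_set : List String), Dom_longest_dictionary_word domain dictionary_set → Spec_longest_dictionary_word domain dictionary_set (longest_dictionary_word domain dictionary_set)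

-- ===== LEMMAS AND PROOFS =====

-- every step of a fold grows the accumulator ⇒ the start is below the result
theorem pv_le_foldl {α : Type} {g : Int → α → Int} {xs : List α}
    (hmono : ∀ a x, x ∈ xs → a ≤ g a x) (acc : Int) : acc ≤ xs.foldl g acc := by
  induction xs generalizing acc with
  | nil => exact le_refl acc
  | cons y ys ih =>
      exact le_trans (hmono acc y (by simp)) (ih (fun a x hx => hmono a x (by simp [hx])) (g acc y))

-- a bound preserved by every step bounds the fold
theorem pv_foldl_le {α : Type} {g : Int → α → Int} {xs : List α} {K : Int}
    (hstep : ∀ a x, x ∈ xs → a ≤ K → g a x ≤ K) {acc : Int} (hacc : acc ≤ K) :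
    xs.foldl g acc ≤ K := by
  induction xs generalizing acc with
  | nil => exact hacc
  | cons y ys ih =>
      exact ih (fun a x hx => hstep a x (by simp [hx])) (hstep acc y (by simp) hacc)

-- if some element forces the accumulator up to v, the result is ≥ v
theorem pv_foldl_ge {α : Type} {g : Int → α → Int} {xs : List α} {x : α} {v : Int}
    (hmono : ∀ a y, y ∈ xs → a ≤ g a y) (hx : x ∈ xs) (hv : ∀ a, v ≤ g a x) (acc : Int) :
    v ≤ xs.foldl g acc := by
  induction xs generalizing acc with
  | nil => cases hx
  | cons y ys ih =>
      rcases List.mem_cons.mp hx with h | h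
      · subst h
        exact le_trans (hv acc)
          (pv_le_foldl (fun a z hz => hmono a z (by simp [hz])) (g acc x))
      · exact ih (fun a z hz => hmono a z (by simp [hz])) h (g acc y)

-- a slice of a string is an infix of it
theorem pv_slice_infix (L : List Char) (a b : Int) :
    PySem.List.slice L (some a) (some b) <:+: L := by
  have h1 : PySem.List.slice L (some a) (some b)
      = (L.drop (PySem.List.clampIdx L.length a)).take
          (PySem.List.clampIdx L.length b - PySem.List.clampIdx L.length a) := by
    simp [PySem.List.slice]
  rw [h1]
  exact (List.take_prefix _ _).isInfix.trans (List.drop_suffix _ _).isInfix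

-- A's inner step never decreases the accumulator
theorem pv_innerstep_mono (dl : String) (ws : List String) (s : Int) :
    ∀ (a e : Int),
      a ≤ (if PySem.Str.slice dl (some s) (some e) ∈ ws ∧
              PySem.Str.len (PySem.Str.slice dl (some s) (some e)) > a then
            PySem.Str.len (PySem.Str.slice dl (some s) (some e)) else a) := by
  intro a e
  split_ifs with h
  · exact le_of_lt h.2
  · exact le_refl a

-- B's result bounds the length of every dictionary word that is an infix of domain_lower
theorem pv_alt_ge (domain : String) (ws : List String) (w : String)
    (hw : w ∈ ws) (hinf : w.toList <:+: (PySem.Str.lower domain).toList) :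
    PySem.Str.len w ≤ longest_dictionary_word_alt domain ws := by
  unfold longest_dictionary_word_alt
  apply pv_foldl_ge (x := w) (v := PySem.Str.len w)
  · intro a y _
    split_ifs with h
    · exact le_max_left _ _
    · exact le_refl a
  · exact hw
  · intro a
    have h : PySem.Chars.isIn w.toList (PySem.Chars.lower domain.toList) = true := by
      have h0 : PySem.Str.isIn w (PySem.Str.lower domain) = true :=
        (PySem.Str.isIn_iff_infix w _).mpr hinf
      simpa using h0
    simp [h]

-- A's result ≤ B's result
theorem pv_a_le_b (domain : String) (ws : List String) :
    longest_dictionary_word domain ws ≤ longest_dictionary_word_alt domain ws := by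
  have hB0 : (0 : Int) ≤ longest_dictionary_word_alt domain ws := by
    unfold longest_dictionary_word_alt
    apply pv_le_foldl
    intro a x _
    split_ifs with h
    · exact le_max_left _ _
    · exact le_refl a
  unfold longest_dictionary_word
  apply pv_foldl_le _ hB0
  intro m s _ hm
  apply pv_foldl_le _ hm
  intro a e _ ha
  split_ifs with h
  · -- the slice is in the dictionary and an infix of domain_lower
    apply pv_alt_ge domain ws _ h.1
    rw [PySem.Str.toList_slice]
    simpa using pv_slice_infix (PySem.Str.lower domain).toList s e
  · exact ha

-- B's result ≤ A's result
theorem pv_b_le_a (domain : String) (ws : List String) :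
    longest_dictionary_word_alt domain ws ≤ longest_dictionary_word domain ws := by
  have hAmono : ∀ (m s : Int),
      m ≤ (PySem.List.pyRange (s + 1) (PySem.Str.len (PySem.Str.lower domain) + 1) 1).foldl
            (fun max_length end_idx =>
              if PySem.Str.slice (PySem.Str.lower domain) (some s) (some end_idx) ∈ ws ∧
                  PySem.Str.len (PySem.Str.slice (PySem.Str.lower domain) (some s) (some end_idx)) > max_length then
                PySem.Str.len (PySem.Str.slice (PySem.Str.lower domain) (some s) (some end_idx))
              else max_length) m := by
    intro m s
    exact pv_le_foldl (fun a e _ => pv_innerstep_mono (PySem.Str.lower domain) ws s a e) m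
  have hA0 : (0 : Int) ≤ longest_dictionary_word domain ws := by
    unfold longest_dictionary_word
    exact pv_le_foldl (fun a s _ => hAmono a s) 0
  unfold longest_dictionary_word_alt
  apply pv_foldl_le _ hA0
  intro a w hw ha
  split_ifs with hIn
  · rw [max_le_iff]
    refine ⟨ha, ?_⟩
    -- the word is an infix: it occurs as a slice [j : j + len w] considered by A
    set dl := PySem.Str.lower domain with hdl
    have hinf := (PySem.Str.isIn_iff_infix w dl).mp hIn
    by_cases hnil : w.toList = []
    · have : PySem.Str.len w = 0 := by rw [PySem.Str.len_eq, hnil]; simp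
      rw [this]; exact hA0
    · obtain ⟨j, hpre⟩ := (PySem.Chars.exists_prefix_drop_iff_isIn w.toList dl.toList).mpr
        ((PySem.Chars.isIn_iff_infix w.toList dl.toList).mpr hinf)
      have hlenw : 0 < w.toList.length := List.length_pos_iff.mpr hnil
      have hjlen : w.toList.length ≤ dl.toList.length - j := by
        simpa using hpre.length_le
      have hjlt : j < dl.toList.length := by omega
      have hslice : PySem.Str.slice dl (some (j : Int)) (some ((j : Int) + (w.toList.length : Int))) = w := by
        apply String.toList_inj.mp
        rw [PySem.Str.toList_slice, PySem.Chars.slice_eq_listSlice,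
          PySem.List.slice_natCast_add (xs := dl.toList) (j := j) (n := w.toList.length)]
        exact (List.prefix_iff_eq_take.mp hpre).symm
      unfold longest_dictionary_word
      apply pv_foldl_ge (x := (j : Int)) (v := PySem.Str.len w)
        (fun a s _ => hAmono a s)
      · rw [PySem.List.mem_pyRange_one, PySem.Str.len_eq]
        constructor
        · exact Int.natCast_nonneg j
        · exact_mod_cast hjlt
      · intro m
        apply pv_foldl_ge (x := (j : Int) + (w.toList.length : Int)) (v := PySem.Str.len w)
          (fun a e _ => pv_innerstep_mono dl ws (j : Int) a e)
        · rw [PySem.List.mem_pyRange_one, PySem.Str.len_eq]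
          constructor
          · omega
          · omega
        · intro a
          rw [hslice]
          by_cases hgt : PySem.Str.len w > a
          · rw [if_pos ⟨hw, hgt⟩]
          · rw [if_neg (fun hc => hgt hc.2)]
            exact le_of_not_gt hgt
  · exact ha

-- ===== VERDICT (by name: the statement is the Claim_ definition above) =====
theorem longest_dictionary_word_spec : Claim_equal_longest_dictionary_word := by
  intro domain ws _
  unfold Spec_longest_dictionary_word
  exact le_antisymm (pv_a_le_b domain ws) (pv_b_le_a domain ws)
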